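-- pv_equiv track=rewrite | github.com/raulferrodrigues/introRedes | T1Intro.py | codificador_nrzi
-- ===== SOURCE A (Python) =====
-- def hexToBin(Str):
--     hexScale = 16
--     num_of_bits = 4 * len(Str)
--     return bin(int(Str, hexScale))[2:].zfill(num_of_bits)
--
-- def codificador_nrzi(hex):
--     dadoBinario = hexToBin(hex)
--     resultado = ""
--     referencia = "-"
--     for elem in range(0, len(dadoBinario)):
--         if dadoBinario[elem] == "0":
--             resultado = resultado + referencia
--         if dadoBinario[elem] == "1":
--             if referencia == "-":
--                 referencia = "+"
--                 resultado = resultado + referencia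
--             else:
--                 referencia = "-"
--                 resultado = resultado + referencia
--     return resultado
-- ===== SOURCE B (Python) =====
-- def hexToBin(Str):
--     hexScale = 16
--     num_of_bits = 4 * len(Str)
--     return bin(int(Str, hexScale))[2:].zfill(num_of_bits)
--
-- def codificador_nrzi(hex):
--     # Stateless closed form: the NRZI symbol at position i is fully determined
--     # by the parity of the number of set bits in the prefix bits[0..i]; each
--     # symbol is computed independently, with no running level state.
--     bits = hexToBin(hex)
--     return "".join(
--         "+" if bits[: i + 1].count("1") % 2 else "-"
--         for i in range(len(bits))
--     )
-- ===== Notes on version B (the rewrite author's own statement) =====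
-- stated objective: alternative
-- what changed: Replaces A's running minus/plus level state machine with a stateless closed form: each output symbol is computed independently, via slice+count, as the parity of the number of set bits in its prefix (no state threaded across iterations), trading O(n) for O(n^2).
-- outside the precondition, e.g. on codificador_nrzi('-1'): A returns '------+', B returns '-------+'; on codificador_nrzi('-ff'): A returns '---+-+-+-+-', B returns '----+-+-+-+-'
import Mathlib
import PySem

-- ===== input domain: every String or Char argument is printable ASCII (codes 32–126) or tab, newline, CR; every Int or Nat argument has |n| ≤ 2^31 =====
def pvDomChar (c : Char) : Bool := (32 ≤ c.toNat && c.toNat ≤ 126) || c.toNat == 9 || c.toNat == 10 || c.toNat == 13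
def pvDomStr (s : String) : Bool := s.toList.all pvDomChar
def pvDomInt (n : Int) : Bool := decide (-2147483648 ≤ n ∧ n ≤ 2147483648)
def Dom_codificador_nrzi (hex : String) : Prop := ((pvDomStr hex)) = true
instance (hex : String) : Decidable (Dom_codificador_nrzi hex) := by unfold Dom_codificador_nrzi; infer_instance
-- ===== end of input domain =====

-- B replaces A's running level state machine by a stateless closed form (per-position prefix parity); alternative decomposition, not faster.

-- shared helper: hexToBin(Str) = bin(int(Str, 16))[2:].zfill(4*len(Str)); none = ValueError from int()
def hexToBin (s : String) : Option String :=
  (PySem.Int.ofStrBase? s 16).map (fun n =>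
    PySem.Str.zfill (PySem.Str.slice (PySem.Int.pyBin n) (some 2) none) (4 * PySem.Str.len s))

-- ===== PORT A =====
def codificador_nrzi (hex : String) : String :=
  match hexToBin hex with
  | none => ""   -- int(hex, 16) raised ValueError; excluded by Pre_
  | some dadoBinario =>
    (dadoBinario.toList.foldl (fun (st : String × String) elem =>
      let st1 := if elem = '0' then (st.1 ++ st.2, st.2) else st
      if elem = '1' then
        (if st1.2 = "-" then (st1.1 ++ "+", "+") else (st1.1 ++ "-", "-"))
      else st1) ("", "-")).1

-- ===== PORT B =====
def codificador_nrzi_alt (hex : String) : String :=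
  match hexToBin hex with
  | none => ""   -- int(hex, 16) raised ValueError; excluded by Pre_
  | some bits =>
    PySem.Str.join "" ((PySem.List.pyRange 0 (PySem.Str.len bits) 1).map (fun i =>
      if PySem.Str.count (PySem.Str.slice bits none (some (i + 1))) "1" % 2 ≠ 0
      then "+" else "-"))

-- ===== PRECONDITION & SPEC =====
-- Pre_ excludes strings that base-16 int() rejects (A raises ValueError) and strings denoting a
-- NEGATIVE value, where the sliced binary representation contains non-bit characters and A's
-- output (it silently skips them) is an accident of its implementation rather than an NRZI encoding.
def Pre_codificador_nrzi (hex : String) : Prop :=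
  0 ≤ (PySem.Int.ofStrBase? hex 16).getD (-1)
instance (hex : String) : Decidable (Pre_codificador_nrzi hex) := by
  unfold Pre_codificador_nrzi; infer_instance
def pvWitness_codificador_nrzi : String := "cafe"

def Spec_codificador_nrzi (hex : String) (out : String) : Prop := out = codificador_nrzi_alt hex
instance (hex : String) (out : String) : Decidable (Spec_codificador_nrzi hex out) := by
  unfold Spec_codificador_nrzi; infer_instance

-- ===== CLAIM (what is proved, stated in full; the proofs are below) =====
def Claim_equal_codificador_nrzi : Prop :=
  ∀ (hex : String), Dom_codificador_nrzi hex → Pre_codificador_nrzi hex →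
    Spec_codificador_nrzi hex (codificador_nrzi hex)

-- ===== LEMMAS AND PROOFS =====

-- A's loop body, named for the proofs
def pvStepA : String × String → Char → String × String := fun st elem =>
  let st1 := if elem = '0' then (st.1 ++ st.2, st.2) else st
  if elem = '1' then
    (if st1.2 = "-" then (st1.1 ++ "+", "+") else (st1.1 ++ "-", "-"))
  else st1

-- the cumulative-parity sequence used to characterise A's state machine
def pvParities : List Char → Bool → List Bool
  | [], _ => []
  | c :: cs, p => let q := xor p (c = '1'); q :: pvParities cs q

theorem pvParities_length (bits : List Char) : ∀ p, (pvParities bits p).length = bits.length := by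
  induction bits with
  | nil => intro p; rfl
  | cons c cs ih => intro p; simp [pvParities, ih]

theorem pvParities_getElem? (bits : List Char) : ∀ (p : Bool) (k : Nat), k < bits.length →
    (pvParities bits p)[k]? = some (xor p ((bits.take (k + 1)).count '1' % 2 = 1)) := by
  induction bits with
  | nil => intro p k hk; simp at hk
  | cons c cs ih =>
    intro p k hk
    cases k with
    | zero =>
      by_cases hc : c = '1' <;> simp [pvParities, hc]
    | succ k =>
      have hk' : k < cs.length := by simpa using hk
      simp only [pvParities, List.getElem?_cons_succ]
      rw [ih _ k hk']
      have hcnt : ((c :: cs).take (k + 1 + 1)).count '1'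
          = (if c = '1' then 1 else 0) + (cs.take (k + 1)).count '1' := by
        by_cases hc : c = '1' <;> (simp [List.take_succ_cons, hc]; try omega)
      simp only [Option.some.injEq]
      rw [hcnt]
      by_cases hc : c = '1' <;> rcases Nat.mod_two_eq_zero_or_one ((cs.take (k + 1)).count '1') with h | h <;>
        simp [hc, Nat.add_mod, h]

theorem pvStepA0 (res ref : String) : pvStepA (res, ref) '0' = (res ++ ref, ref) := by
  simp [pvStepA]

theorem pvStepA1 (res : String) (p : Bool) :
    pvStepA (res, if p then "+" else "-") '1'
      = (res ++ (if !p then "+" else "-"), if !p then "+" else "-") := by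
  cases p <;> simp [pvStepA]

theorem pvSym (p : Bool) : String.ofList [if p then '+' else '-'] = (if p then "+" else "-") := by
  cases p <;> rfl

theorem pvFoldA (bits : List Char) (hb : ∀ c ∈ bits, c = '0' ∨ c = '1') :
    ∀ (res : String) (p : Bool),
    (bits.foldl pvStepA (res, if p then "+" else "-")).1
      = res ++ String.ofList ((pvParities bits p).map (fun q => if q then '+' else '-')) := by
  induction bits with
  | nil => intro res p; simp [pvParities]
  | cons c cs ih =>
    intro res p
    have hbs : ∀ x ∈ cs, x = '0' ∨ x = '1' := fun x hx => hb x (List.mem_cons_of_mem _ hx)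
    rcases hb c (by simp) with h0 | h1
    · subst h0
      simp only [List.foldl_cons, pvParities, pvStepA0]
      rw [show (xor p (decide (('0':Char) = '1'))) = p by simp]
      rw [ih hbs]
      simp only [List.map_cons]
      rw [show ((if p then '+' else '-') :: (pvParities cs p).map (fun q => if q then '+' else '-'))
            = [if p then '+' else '-'] ++ (pvParities cs p).map (fun q => if q then '+' else '-')
          from rfl]
      simp only [String.ofList_append, pvSym]
      rw [String.append_assoc]
    · subst h1
      simp only [List.foldl_cons, pvParities, pvStepA1]
      simp only [decide_true, Bool.xor_true]
      rw [ih hbs]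
      simp only [List.map_cons]
      rw [show ((if !p then '+' else '-') :: (pvParities cs (!p)).map (fun q => if q then '+' else '-'))
            = [if !p then '+' else '-'] ++ (pvParities cs (!p)).map (fun q => if q then '+' else '-')
          from rfl]
      simp only [String.ofList_append, pvSym]
      rw [String.append_assoc]

-- s.count(c) for a single-character needle counts the occurrences of that character
theorem pvCountGo : ∀ (fuel : Nat) (l : List Char) (acc : Nat), l.length ≤ fuel →
    PySem.Chars.count.go ['1'] fuel l acc = acc + l.count '1' := by
  intro fuel
  induction fuel with
  | zero =>
    intro l acc hl
    have : l = [] := List.eq_nil_of_length_eq_zero (Nat.le_zero.mp hl)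
    subst this; rfl
  | succ f ih =>
    intro l acc hl
    cases l with
    | nil => rfl
    | cons h t =>
      rw [PySem.Chars.count.go]
      by_cases hh : h = '1'
      · rw [if_pos (by simp [hh, List.isPrefixOf])]
        simp only [List.length_cons, List.length_nil, List.drop_succ_cons, List.drop_zero]
        rw [ih t (acc + 1) (by simpa using hl)]
        simp [hh]; omega
      · rw [if_neg (by simp [List.isPrefixOf]; exact fun hc => hh hc.symm)]
        rw [ih t acc (by simpa using hl)]
        simp [hh]
theorem pvCountSingle (cs : List Char) : PySem.Chars.count cs ['1'] = cs.count '1' := by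
  unfold PySem.Chars.count
  rw [if_neg (by simp)]
  simpa using pvCountGo cs.length cs 0 le_rfl

-- B's output characterised: the per-position symbols as a char list
theorem pvAltChars (bits : String) :
    PySem.Str.join "" ((PySem.List.pyRange 0 (bits.toList.length : Int) 1).map (fun i =>
      if PySem.Str.count (PySem.Str.slice bits none (some (i + 1))) "1" % 2 ≠ 0
      then "+" else "-"))
    = String.ofList ((List.range bits.toList.length).map (fun k =>
        if (bits.toList.take (k + 1)).count '1' % 2 = 1 then '+' else '-')) := by
  rw [PySem.List.pyRange_one, List.map_map]
  rw [show ((bits.toList.length : Int) - 0).toNat = bits.toList.length from by simp]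
  apply String.toList_inj.mp
  rw [PySem.Str.toList_join, List.map_map]
  rw [show ("" : String).toList = ([] : List Char) from rfl]
  have hmap : (List.range bits.toList.length).map
        (String.toList ∘ ((fun i : Int =>
          if PySem.Str.count (PySem.Str.slice bits none (some (i + 1))) "1" % 2 ≠ 0
          then ("+" : String) else "-") ∘ (fun k : Nat => (0 : Int) + k)))
      = ((List.range bits.toList.length).map (fun k =>
          if (bits.toList.take (k + 1)).count '1' % 2 = 1 then '+' else '-')).map (fun c => [c]) := by
    rw [List.map_map]
    apply List.map_congr_left
    intro k _
    simp only [Function.comp_apply, zero_add]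
    have hcnt : PySem.Str.count (PySem.Str.slice bits none (some ((k : Int) + 1))) "1"
        = (bits.toList.take (k + 1)).count '1' := by
      rw [PySem.Str.count_eq, PySem.Str.toList_slice, PySem.Chars.slice_eq_listSlice]
      rw [show ((k : Int) + 1) = ((k + 1 : Nat) : Int) from by push_cast; ring]
      rw [PySem.List.slice_to_natCast bits.toList (k + 1)]
      exact pvCountSingle _
    rw [hcnt]
    rw [if_congr (by omega :
        ((bits.toList.take (k + 1)).count '1' % 2 ≠ 0) ↔ ((bits.toList.take (k + 1)).count '1' % 2 = 1))
      rfl rfl]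
    by_cases hq : (bits.toList.take (k + 1)).count '1' % 2 = 1 <;> simp [hq]
  rw [hmap, PySem.Chars.join_nil_singletons, String.toList_ofList]

theorem pvToDigitsCoreBinary : ∀ (fuel n : Nat) (acc : List Char),
    (∀ c ∈ acc, c = '0' ∨ c = '1') →
    ∀ c ∈ Nat.toDigitsCore 2 fuel n acc, c = '0' ∨ c = '1' := by
  intro fuel
  induction fuel with
  | zero => intro n acc hacc; simpa [Nat.toDigitsCore] using hacc
  | succ f ih =>
    intro n acc hacc
    have hd : (n % 2).digitChar = '0' ∨ (n % 2).digitChar = '1' := by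
      rcases Nat.mod_two_eq_zero_or_one n with h | h <;> simp [h, Nat.digitChar]
    have hacc' : ∀ c ∈ (n % 2).digitChar :: acc, c = '0' ∨ c = '1' := by
      intro c hc
      rcases List.mem_cons.mp hc with h | h
      · subst h; exact hd
      · exact hacc c h
    intro c hc
    simp only [Nat.toDigitsCore] at hc
    split at hc
    · exact hacc' c hc
    · exact ih _ _ hacc' c hc

theorem pvBitsBinary (n : Int) (hn : 0 ≤ n) (w : Int) :
    ∀ c ∈ PySem.Chars.zfill (PySem.Int.toBinChars n) w, c = '0' ∨ c = '1' := by
  have hbin : ∀ c ∈ PySem.Int.toBinChars n, c = '0' ∨ c = '1' := by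
    intro c hc
    unfold PySem.Int.toBinChars at hc
    rw [if_neg (by omega)] at hc
    exact pvToDigitsCoreBinary _ _ [] (by simp) c hc
  intro c hc
  unfold PySem.Chars.zfill at hc
  split at hc
  · exact hbin c hc
  · rcases hcs : PySem.Int.toBinChars n with _ | ⟨c0, rest⟩
    · rw [hcs] at hc
      simp only [List.mem_replicate] at hc
      exact Or.inl hc.2
    · rw [hcs] at hc
      dsimp only at hc
      have hc0 : c0 = '0' ∨ c0 = '1' := hbin c0 (by rw [hcs]; simp)
      rw [if_neg (by rcases hc0 with h | h <;> subst h <;> simp)] at hc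
      rcases List.mem_append.mp hc with h | h
      · exact Or.inl (List.eq_of_mem_replicate h)
      · exact hbin c (by rw [hcs]; exact h)

-- the '[2:]'-sliced, zfilled binary string of a nonnegative int is made of '0'/'1' only
theorem pvHexToBinBinary (s : String) (n : Int) (hn : 0 ≤ n)
    (h : PySem.Int.ofStrBase? s 16 = some n) :
    ∀ b, hexToBin s = some b → ∀ c ∈ b.toList, c = '0' ∨ c = '1' := by
  intro b hb c hc
  unfold hexToBin at hb
  rw [h] at hb
  simp only [Option.map_some, Option.some.injEq] at hb
  subst hb
  rw [PySem.Str.toList_zfill] at hc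
  have hsl : (PySem.Str.slice (PySem.Int.pyBin n) (some 2) none).toList
      = PySem.Int.toBinChars n := by
    have := PySem.Str.toList_slice (PySem.Int.pyBin n) (some 2) none
    rw [this, PySem.Chars.slice_eq_listSlice, PySem.List.slice_from _ (by norm_num : (0:Int) ≤ 2),
        PySem.Int.toList_pyBin]
    unfold PySem.Int.toBinChars0b
    rw [if_neg (by omega)]
    unfold PySem.Int.toBinChars
    rw [if_neg (by omega)]
    simp
  rw [hsl] at hc
  exact pvBitsBinary n hn _ c hc

-- ===== VERDICT (by name: the statement is the Claim_ definition above) =====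
theorem codificador_nrzi_spec : Claim_equal_codificador_nrzi := by
  intro hex _ hpre
  unfold Spec_codificador_nrzi
  unfold Pre_codificador_nrzi at hpre
  rcases hh : PySem.Int.ofStrBase? hex 16 with _ | n
  · rw [hh] at hpre; norm_num at hpre
  · rw [hh] at hpre
    simp only [Option.getD_some] at hpre
    rcases hb : hexToBin hex with _ | bits
    · unfold hexToBin at hb; rw [hh] at hb; simp at hb
    · have hbin := pvHexToBinBinary hex n hpre hh bits hb
      unfold codificador_nrzi codificador_nrzi_alt
      rw [hb]
      simp only
      rw [show (fun (st : String × String) elem =>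
            let st1 := if elem = '0' then (st.1 ++ st.2, st.2) else st
            if elem = '1' then
              (if st1.2 = "-" then (st1.1 ++ "+", "+") else (st1.1 ++ "-", "-"))
            else st1) = pvStepA from rfl]
      have hA := pvFoldA bits.toList hbin "" false
      rw [show (if (false : Bool) then "+" else "-") = ("-" : String) from rfl] at hA
      rw [hA]
      rw [show PySem.Str.len bits = (bits.toList.length : Int) from by
        simp [PySem.Str.len_eq]]
      rw [pvAltChars bits, String.empty_append]
      congr 1
      apply List.ext_getElem
      · simp [pvParities_length]
      · intro k h1 h2
        have hk : k < bits.toList.length := by simpa [pvParities_length] using h1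
        have := pvParities_getElem? bits.toList false k hk
        simp only [Bool.false_xor] at this
        have h1' : k < (pvParities bits.toList false).length := by
          simpa [pvParities_length] using hk
        rw [List.getElem_map, List.getElem_map, List.getElem_range]
        have hp : (pvParities bits.toList false)[k]'h1'
            = decide ((bits.toList.take (k + 1)).count '1' % 2 = 1) := by
          have h' := this
          rw [List.getElem?_eq_getElem h1'] at h'
          exact Option.some.inj h'
        rw [hp]
        by_cases hq : (bits.toList.take (k + 1)).count '1' % 2 = 1 <;> simp [hq]
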